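-- pv_equiv track=rewrite | github.com/pozorvlak/cassidoo | 2022/2022-01-10_cap_permutations/cap_permutations.py | cap_permutations
-- ===== SOURCE A (Python) =====
-- from string import ascii_letters
--
-- def cap_permutations(s):
--     if len(s) == 0:
--         return [""]
--     tails = cap_permutations(s[1:])
--     if s[0] in ascii_letters:
--         l = s[0].lower()
--         u = s[0].upper()
--         return [l + t for t in tails] + [u + t for t in tails]
--     else:
--         return [s[0] + t for t in tails]
-- ===== SOURCE B (Python) =====
-- from string import ascii_letters
-- from itertools import product
--
-- def cap_permutations(s):
--     options = [(c.lower(), c.upper()) if c in ascii_letters else (c,) for c in s]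
--     return ["".join(p) for p in product(*options)]
-- ===== Notes on version B (the rewrite author's own statement) =====
-- stated objective: idiomatic
-- what changed: Replaces the head/tail string-slicing recursion by a per-character options list fed to itertools.product, joining each tuple once.
import Mathlib
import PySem

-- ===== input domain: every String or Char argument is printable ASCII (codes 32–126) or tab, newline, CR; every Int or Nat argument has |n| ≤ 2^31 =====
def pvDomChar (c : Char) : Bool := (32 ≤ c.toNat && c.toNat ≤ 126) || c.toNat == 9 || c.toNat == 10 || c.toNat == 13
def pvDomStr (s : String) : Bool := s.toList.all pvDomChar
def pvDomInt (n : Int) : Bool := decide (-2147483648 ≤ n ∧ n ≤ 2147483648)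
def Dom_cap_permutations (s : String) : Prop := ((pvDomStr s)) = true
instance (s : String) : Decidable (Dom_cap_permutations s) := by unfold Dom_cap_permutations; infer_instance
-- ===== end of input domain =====

-- B replaces A's head/tail recursion by a per-character options list fed to a Cartesian product (idiomatic itertools.product style).


-- ===== PORT A =====
-- the module-level constant string.ascii_letters
def pvAsciiLetters : List Char :=
  "abcdefghijklmnopqrstuvwxyzABCDEFGHIJKLMNOPQRSTUVWXYZ".toList

-- A's recursion, on the string's characters; Python strings are carried as List Char
-- (l + t string concatenation becomes [l] ++ t), converted to String once at the top.
def pvCapA : List Char → List (List Char)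
  | [] => [[]]
  | c :: cs =>
    let tails := pvCapA cs
    if PySem.Chars.isIn [c] pvAsciiLetters then
      let l := PySem.Chars.lowerChar c
      let u := PySem.Chars.upperChar c
      (tails.map (fun t => [l] ++ t)) ++ (tails.map (fun t => [u] ++ t))
    else
      tails.map (fun t => [c] ++ t)

def cap_permutations (s : String) : List String :=
  (pvCapA s.toList).map (fun cs => String.mk cs)

-- ===== PORT B =====
-- per-character options, as in Source B's list comprehension
def pvOptions (c : Char) : List (List Char) :=
  if PySem.Chars.isIn [c] pvAsciiLetters then
    [[PySem.Chars.lowerChar c], [PySem.Chars.upperChar c]]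
  else
    [[c]]

-- itertools.product (leftmost position varies slowest), fused with ''.join
def pvProduct : List (List (List Char)) → List (List Char)
  | [] => [[]]
  | o :: rest => o.flatMap (fun x => (pvProduct rest).map (fun p => x ++ p))

def cap_permutations_alt (s : String) : List String :=
  (pvProduct (s.toList.map pvOptions)).map (fun cs => String.mk cs)

-- ===== PRECONDITION & SPEC =====
def Spec_cap_permutations (s : String) (out : List String) : Prop := out = cap_permutations_alt s
instance (s : String) (out : List String) : Decidable (Spec_cap_permutations s out) := by unfold Spec_cap_permutations; infer_instance

-- ===== CLAIM (what is proved, stated in full; the proofs are below) =====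
def Claim_equal_cap_permutations : Prop := ∀ (s : String), Dom_cap_permutations s → Spec_cap_permutations s (cap_permutations s)

-- ===== LEMMAS AND PROOFS =====
theorem pvCapA_eq_product (cs : List Char) : pvCapA cs = pvProduct (cs.map pvOptions) := by
  induction cs with
  | nil => rfl
  | cons c cs ih =>
    simp only [pvCapA, List.map_cons, pvProduct, pvOptions, ih]
    by_cases h : PySem.Chars.isIn [c] pvAsciiLetters
    · simp [h, List.flatMap]
    · simp [h, List.flatMap]

-- ===== VERDICT (by name: the statement is the Claim_ definition above) =====
theorem cap_permutations_spec : Claim_equal_cap_permutations := by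
  intro s _
  unfold Spec_cap_permutations cap_permutations cap_permutations_alt
  rw [pvCapA_eq_product]
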